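-- pv_equiv track=rewrite | github.com/luv1327/Scaler_Dsa | AdvanceDsa4/graphsOne.py | bfs
-- ===== SOURCE A (Python) =====
-- from collections import deque
--
-- def generateAdjMatrix(N,M,isUndirected):
--     n = len(N)
--     hm = {}
--     for i in range(n):
--         source = N[i]
--         destination = M[i]
--         if source in hm:
--             hm[source].append(destination)
--         else:
--             hm[source] = [destination]
--         if isUndirected:
--             if destination in hm:
--                 hm[destination].append(source)
--             else:
--                 hm[destination] = [source]
--     return hm
--
-- def bfs(N,M,s,d):
--     n = len(N)
--     adj = generateAdjMatrix(N,M,True)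
--     visited = [False] * (n+1)
--     q = deque()
--     q.append(s)
--     visited[s] = True
--     while len(q) > 0:
--         source = q[0]
--         q.popleft()
--         if source in adj:
--             for x in adj[source]:
--                 if visited[x] == False:
--                     visited[x] = True
--                     q.append(x)
--     return visited[n]
-- ===== SOURCE B (Python) =====
-- def generateAdjMatrix(N,M,isUndirected):
--     n = len(N)
--     hm = {}
--     for i in range(n):
--         source = N[i]
--         destination = M[i]
--         if source in hm:
--             hm[source].append(destination)
--         else:
--             hm[source] = [destination]
--         if isUndirected:
--             if destination in hm:
--                 hm[destination].append(source)
--             else: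
--                 hm[destination] = [source]
--     return hm
--
-- def bfs(N, M, s, d):
--     # recursive depth-first search instead of A's FIFO-queue BFS;
--     # same adjacency dict, same visited array, same return value
--     n = len(N)
--     adj = generateAdjMatrix(N, M, True)
--     visited = [False] * (n + 1)
--     visited[s] = True
--     def dfs(u):
--         for x in adj.get(u, []):
--             if not visited[x]:
--                 visited[x] = True
--                 dfs(x)
--     dfs(s)
--     return visited[n]
-- ===== Notes on version B (the rewrite author's own statement) =====
-- stated objective: alternative
-- what changed: A's FIFO-queue BFS (deque, popleft, level-order expansion) is replaced by a recursive depth-first search over the same adjacency dict and visited array; no queue is maintained.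
-- outside the precondition, e.g. on bfs([4, -2, -4, 1], [1, -3, -3, -2], -3, 0): A returns False, B returns True; on bfs([0, -3, 0, -5, 1], [5, 4, -5, 4, -3], 4, 0): A returns True, B returns False
import Mathlib
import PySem

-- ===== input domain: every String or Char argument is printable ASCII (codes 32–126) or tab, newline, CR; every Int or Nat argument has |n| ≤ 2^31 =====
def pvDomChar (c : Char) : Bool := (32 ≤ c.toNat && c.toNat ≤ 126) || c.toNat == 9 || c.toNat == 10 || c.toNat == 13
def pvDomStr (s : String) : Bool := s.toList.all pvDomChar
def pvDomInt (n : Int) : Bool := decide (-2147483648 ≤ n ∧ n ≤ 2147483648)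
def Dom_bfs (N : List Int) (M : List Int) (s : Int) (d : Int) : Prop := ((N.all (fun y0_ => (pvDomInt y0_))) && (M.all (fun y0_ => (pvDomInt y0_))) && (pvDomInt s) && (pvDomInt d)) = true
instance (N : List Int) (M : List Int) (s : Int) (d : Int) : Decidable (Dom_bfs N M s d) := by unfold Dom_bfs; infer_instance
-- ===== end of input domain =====

-- B replaces A's FIFO-queue BFS by a recursive depth-first search over the same
-- adjacency dict and visited array; objective: alternative traversal, same return value.

-- ===== PORT A =====
-- helper shared by both Pythons verbatim (A's generateAdjMatrix; B keeps it unchanged)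
def generateAdjMatrix (N : List Int) (M : List Int) (isUndirected : Bool) : PySem.Dict Int (List Int) :=
  (PySem.List.pyRange 0 (N.length : Int) 1).foldl (fun hm i =>
    let source := PySem.List.pyGetD N i 0
    let destination := PySem.List.pyGetD M i 0
    let hm1 := if hm.contains source then hm.modify source [] (fun l => l ++ [destination])
               else hm.insert source [destination]
    if isUndirected then
      if hm1.contains destination then hm1.modify destination [] (fun l => l ++ [source])
      else hm1.insert destination [source]
    else hm1) PySem.Dict.empty

-- body of A's inner 'for x in adj[source]' loop (state: visited, queue);
-- 'visited[x] == False' is pyGet? = some false: where the Python raises IndexError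
-- (pyGet? = none) the port skips the neighbour — exact wherever the Python returns
def bfsStep (st : List Bool × List Int) (x : Int) : List Bool × List Int :=
  if PySem.List.pyGet? st.1 x = some false then
    (PySem.List.pySetD st.1 x true, st.2 ++ [x])
  else st

-- A's 'while len(q) > 0' loop; the fuel argument only makes the recursion total
-- (n+2 iterations are proved sufficient under Pre_, since each pop either ends the
-- loop or strictly decreases queue-length + number of unvisited slots)
def bfsLoop (adj : PySem.Dict Int (List Int)) : Nat → List Bool → List Int → List Bool
  | 0, visited, _q => visited
  | fuel+1, visited, q =>
    match q with
    | [] => visited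
    | source :: rest =>
      if adj.contains source then
        let st := (adj.getD source []).foldl bfsStep (visited, rest)
        bfsLoop adj fuel st.1 st.2
      else bfsLoop adj fuel visited rest

def bfs (N : List Int) (M : List Int) (s : Int) (d : Int) : Bool :=
  let n := N.length
  let adj := generateAdjMatrix N M true
  let visited := PySem.List.pySetD (List.replicate (n+1) false) s true
  let out := bfsLoop adj (n + 2) visited [s]
  PySem.List.pyGetD out (n : Int) false

-- ===== PORT B =====
-- B's recursive 'dfs(u)': fold over adj.get(u, []) threading the visited list;
-- 'not visited[x]' is pyGet? = some false (the port skips where the Python raises);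
-- the fuel argument only makes the recursion total (n+2 is proved sufficient under
-- Pre_, since every recursive call is preceded by a fresh mark)
def dfsGo (adj : PySem.Dict Int (List Int)) : Nat → Int → List Bool → List Bool
  | 0, _u, visited => visited
  | fuel+1, u, visited =>
    (adj.getD u []).foldl (fun vis x =>
      if PySem.List.pyGet? vis x = some false then
        dfsGo adj fuel x (PySem.List.pySetD vis x true)
      else vis) visited

def bfs_alt (N : List Int) (M : List Int) (s : Int) (d : Int) : Bool :=
  let n := N.length
  let adj := generateAdjMatrix N M true
  let visited := PySem.List.pySetD (List.replicate (n+1) false) s true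
  let out := dfsGo adj (n + 2) s visited
  PySem.List.pyGetD out (n : Int) false

-- ===== PRECONDITION & SPEC =====
-- Pre_ keeps M at least as long as N (else A raises IndexError building the dict),
-- the source s inside Python's index range -(n+1)..n for the visited list (else A
-- raises IndexError at visited[s]), and excludes inputs where two DISTINCT in-range
-- labels denote the same visited slot (Python's negative-index wraparound makes a
-- negative label u an alias of u+n+1): on such aliased inputs the traversal order
-- decides which alias gets explored, so A's and B's values are both accidental
-- artefacts of list indexing and neither is the specified behaviour.
def Pre_bfs (N : List Int) (M : List Int) (s : Int) (d : Int) : Prop :=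
  N.length ≤ M.length ∧
  -((N.length : Int)+1) ≤ s ∧ s ≤ (N.length : Int) ∧
  (∀ x ∈ s :: (N ++ M.take N.length), ∀ y ∈ s :: (N ++ M.take N.length),
    -((N.length : Int)+1) ≤ x → x ≤ (N.length : Int) →
    -((N.length : Int)+1) ≤ y → y ≤ (N.length : Int) →
    x % ((N.length : Int)+1) = y % ((N.length : Int)+1) → x = y)
instance (N : List Int) (M : List Int) (s : Int) (d : Int) : Decidable (Pre_bfs N M s d) := by
  unfold Pre_bfs; infer_instance

def pvWitness_bfs : List Int × List Int × Int × Int := ([0, 2], [1, 2], 0, 0)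

def Spec_bfs (N : List Int) (M : List Int) (s : Int) (d : Int) (out : Bool) : Prop := out = bfs_alt N M s d
instance (N : List Int) (M : List Int) (s : Int) (d : Int) (out : Bool) : Decidable (Spec_bfs N M s d out) := by unfold Spec_bfs; infer_instance

-- ===== CLAIM (what is proved, stated in full; the proofs are below) =====
def Claim_equal_bfs : Prop := ∀ (N : List Int) (M : List Int) (s : Int) (d : Int), Dom_bfs N M s d → Pre_bfs N M s d → Spec_bfs N M s d (bfs N M s d)

-- ===== LEMMAS AND PROOFS =====

-- the visited-list slot Python's indexing assigns to label x (negative labels wrap)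
def slotI (m : Nat) (x : Int) : Nat := (x % (m : Int)).toNat

-- slot j is marked in the visited list V
def MkS (V : List Bool) (j : Nat) : Prop := V.getD j false = true

-- v is a neighbour of u in the adjacency dict
def NbrP (adj : PySem.Dict Int (List Int)) (u v : Int) : Prop := v ∈ adj.getD u []

-- one traversal step: a neighbour that is inside Python's index range
def NbrC (adj : PySem.Dict Int (List Int)) (m : Nat) (u v : Int) : Prop :=
  NbrP adj u v ∧ PySem.Raise.InRange m v

-- x is reachable from s along in-range dict edges
def ReachC (adj : PySem.Dict Int (List Int)) (m : Nat) (s x : Int) : Prop :=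
  Relation.ReflTransGen (NbrC adj m) s x

-- every marked slot is the slot of some reachable label
def SoundV (adj : PySem.Dict Int (List Int)) (m : Nat) (s : Int) (V : List Bool) : Prop :=
  ∀ j, MkS V j → ∃ y, ReachC adj m s y ∧ slotI m y = j

lemma getD_true_lt {V : List Bool} {j : Nat} (h : V.getD j false = true) : j < V.length := by
  by_contra hlt
  have := List.getD_eq_default V false (n := j) (by omega)
  rw [h] at this; simp at this

lemma getD_set_self {V : List Bool} {i : Nat} (h : i < V.length) :
    (V.set i true).getD i false = true := by
  simp [List.getD_eq_getElem?_getD, h]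

lemma getD_set_mono {V : List Bool} {i j : Nat} (h : V.getD j false = true) :
    (V.set i true).getD j false = true := by
  have hj : j < V.length := getD_true_lt h
  by_cases hij : i = j
  · subst hij; simp [List.getD_eq_getElem?_getD, hj]
  · simpa [List.getD_eq_getElem?_getD, List.getElem?_set_ne hij] using h

lemma getD_set_rev {V : List Bool} {i j : Nat} (h : (V.set i true).getD j false = true) :
    V.getD j false = true ∨ j = i := by
  by_cases hij : j = i
  · exact Or.inr hij
  · left
    simpa [List.getD_eq_getElem?_getD, List.getElem?_set_ne (Ne.symm hij)] using h

lemma count_false_set {V : List Bool} {i : Nat} (hlt : i < V.length)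
    (hf : V.getD i false = false) :
    (V.set i true).count false + 1 = V.count false := by
  have hg : V[i] = false := by
    have := (List.getD_eq_getElem?_getD (l := V) (i := i) (a := false)).symm.trans hf
    rwa [List.getElem?_eq_getElem hlt, Option.getD_some] at this
  have hc := List.count_set (a := true) (b := false) (l := V) (i := i) hlt
  have hpos : 0 < V.count false := List.count_pos_iff.2 (hg ▸ List.getElem_mem hlt)
  simp [hg] at hc
  omega

-- ----- Python wraparound indexing, in terms of slots -----

lemma slotI_lt {m : Nat} (hm : 0 < m) (x : Int) : slotI m x < m := by
  have h := Int.emod_lt_of_pos x (b := (m : Int)) (by exact_mod_cast hm)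
  have h0 : 0 ≤ x % (m : Int) := Int.emod_nonneg x (by positivity)
  unfold slotI; omega

lemma pyIdx?_wrap {m : Nat} {x : Int} (hm : 0 < m) (h : PySem.Raise.InRange m x) :
    PySem.List.pyIdx? m x = some (slotI m x) := by
  obtain ⟨h1, h2⟩ := h
  simp only [PySem.List.pyIdx?, slotI]
  by_cases hx : 0 ≤ x
  · rw [if_pos hx, if_pos h2]
    congr 1
    rw [Int.emod_eq_of_lt hx h2]
  · rw [if_neg hx, if_pos h1]
    congr 1
    have hx' : x % (m : Int) = x + m := by
      have h3 : (x + (m : Int) * 1) % (m : Int) = x % m := Int.add_mul_emod_self_left x (m : Int) 1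
      rw [mul_one] at h3
      rw [← h3, Int.emod_eq_of_lt (by omega) (by omega)]
    omega

lemma pyIdx?_oor {m : Nat} {x : Int} (h : ¬ PySem.Raise.InRange m x) :
    PySem.List.pyIdx? m x = none := by
  simp only [PySem.Raise.InRange, not_and_or, not_le, not_lt] at h
  simp only [PySem.List.pyIdx?]
  rcases h with h | h
  · rw [if_neg (by omega), if_neg (by omega)]
  · rw [if_pos (by omega), if_neg (by omega)]

lemma pyGet?_wrap {V : List Bool} {x : Int} (h : PySem.Raise.InRange V.length x) :
    PySem.List.pyGet? V x = some (V.getD (slotI V.length x) false) := by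
  have hm : 0 < V.length := by
    rcases h with ⟨h1, h2⟩; omega
  have hs := slotI_lt hm x
  simp only [PySem.List.pyGet?, pyIdx?_wrap hm h, Option.bind_some]
  rw [List.getElem?_eq_getElem hs, List.getD_eq_getElem?_getD, List.getElem?_eq_getElem hs,
    Option.getD_some]

lemma pyGet?_oorL {V : List Bool} {x : Int} (h : ¬ PySem.Raise.InRange V.length x) :
    PySem.List.pyGet? V x = none := by
  simp only [PySem.List.pyGet?, pyIdx?_oor h, Option.bind_none]

lemma pyGet?_some_inv {V : List Bool} {x : Int} {b : Bool}
    (ht : PySem.List.pyGet? V x = some b) :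
    PySem.Raise.InRange V.length x ∧ V.getD (slotI V.length x) false = b := by
  by_cases h : PySem.Raise.InRange V.length x
  · rw [pyGet?_wrap h] at ht
    exact ⟨h, by injection ht⟩
  · rw [pyGet?_oorL h] at ht
    cases ht

lemma pySetD_wrap {V : List Bool} {x : Int} (v : Bool) (h : PySem.Raise.InRange V.length x) :
    PySem.List.pySetD V x v = V.set (slotI V.length x) v := by
  have hm : 0 < V.length := by rcases h with ⟨h1, h2⟩; omega
  simp only [PySem.List.pySetD, PySem.List.pySet?, pyIdx?_wrap hm h, Option.map_some,
    Option.getD_some]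

-- ----- the adjacency dict: values are input labels -----

lemma mem_items_of_get? {d : PySem.Dict Int (List Int)} {k : Int} {v : List Int}
    (h : d.get? k = some v) : (k, v) ∈ d.items := by
  simp only [PySem.Dict.get?, Option.map_eq_some_iff] at h
  obtain ⟨p, hp, hv⟩ := h
  have hmem := List.mem_of_find?_eq_some hp
  have hkey := List.find?_some hp
  simp at hkey
  obtain ⟨p1, p2⟩ := p
  simp_all

def DictBnd (B : Int → Prop) (d : PySem.Dict Int (List Int)) : Prop :=
  ∀ p ∈ d.items, B p.1 ∧ ∀ x ∈ p.2, B x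

lemma bnd_insert {d : PySem.Dict Int (List Int)} {B : Int → Prop} {k : Int} {v : List Int}
    (hd : DictBnd B d) (hk : B k) (hv : ∀ x ∈ v, B x) : DictBnd B (d.insert k v) := by
  intro p hp
  rw [PySem.Dict.mem_items_insert] at hp
  rcases hp with rfl | ⟨hp, _⟩
  · exact ⟨hk, hv⟩
  · exact hd p hp

lemma getD_sub {d : PySem.Dict Int (List Int)} {B : Int → Prop}
    (hd : DictBnd B d) (k : Int) : ∀ x ∈ d.getD k [], B x := by
  intro x hx
  simp only [PySem.Dict.getD] at hx
  cases hg : d.get? k with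
  | none => rw [hg] at hx; simp at hx
  | some l =>
    rw [hg] at hx
    exact (hd _ (mem_items_of_get? hg)).2 x hx

lemma bnd_step {dd : PySem.Dict Int (List Int)} {B : Int → Prop} {k x : Int}
    (hd : DictBnd B dd) (hk : B k) (hx : B x) :
    DictBnd B (if dd.contains k then dd.modify k [] (fun l => l ++ [x]) else dd.insert k [x]) := by
  simp only [PySem.Dict.modify]
  split
  · refine bnd_insert hd hk ?_
    intro y hy
    rcases List.mem_append.1 hy with h1 | h1
    · exact getD_sub hd _ y h1
    · simp at h1; subst h1; exact hx
  · refine bnd_insert hd hk ?_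
    intro y hy; simp at hy; subst hy; exact hx

-- every invariant of dict-building steps holds of the finished adjacency dict
lemma adj_foldInv (N M : List Int) (b : Bool) (C : PySem.Dict Int (List Int) → Prop)
    (h0 : C PySem.Dict.empty)
    (hstep : ∀ dd i, i ∈ PySem.List.pyRange 0 (N.length : Int) 1 → C dd →
      C (let source := PySem.List.pyGetD N i 0
         let destination := PySem.List.pyGetD M i 0
         let hm1 := if dd.contains source then dd.modify source [] (fun l => l ++ [destination])
                    else dd.insert source [destination]
         if b then
           if hm1.contains destination then hm1.modify destination [] (fun l => l ++ [source])
           else hm1.insert destination [source]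
         else hm1)) :
    C (generateAdjMatrix N M b) := by
  unfold generateAdjMatrix
  exact List.foldlRecOn (motive := fun dd => C dd) _ _ h0 (fun dd hd i hi => hstep dd i hi hd)

lemma adj_labels (N M : List Int) (hlen : N.length ≤ M.length) :
    DictBnd (fun x => x ∈ N ++ M.take N.length) (generateAdjMatrix N M true) := by
  apply adj_foldInv N M true (DictBnd (fun x => x ∈ N ++ M.take N.length))
    (by intro p hp; simp [PySem.Dict.empty] at hp)
  intro dd i hi hd
  have hi' : 0 ≤ i ∧ i < (N.length : Int) := PySem.List.mem_pyRange_one.1 hi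
  have hsrc : PySem.List.pyGetD N i 0 ∈ N ++ M.take N.length := by
    refine List.mem_append_left _ ?_
    exact PySem.List.pyGetD_mem N 0 ⟨by omega, by omega⟩
  have hdst : PySem.List.pyGetD M i 0 ∈ N ++ M.take N.length := by
    refine List.mem_append_right _ ?_
    have hlt : i < (M.length : Int) := by omega
    rw [PySem.List.pyGetD_eq_getElem M 0 hi'.1 hlt]
    have hl : i.toNat < (M.take N.length).length := by simp; omega
    exact (List.getElem_take (xs := M)) ▸ List.getElem_mem hl
  exact bnd_step (bnd_step hd hsrc hdst) hdst hsrc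

lemma getD_eq_nil_of_not_contains {adj : PySem.Dict Int (List Int)} {u : Int}
    (h : adj.contains u = false) : adj.getD u [] = [] := by
  have := (PySem.Dict.get?_eq_none_iff_contains adj u).2 h
  simp [PySem.Dict.getD, this]

-- ----- reachable labels are used labels and in range -----

lemma reach_mem {adj : PySem.Dict Int (List Int)} {m : Nat} {s : Int} {U : List Int}
    (hvals : ∀ u v, NbrP adj u v → v ∈ U) (hsU : s ∈ U) :
    ∀ y, ReachC adj m s y → y ∈ U := by
  intro y h
  induction h with
  | refl => exact hsU
  | tail _ h2 _ => exact hvals _ _ h2.1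

lemma reach_inR {adj : PySem.Dict Int (List Int)} {m : Nat} {s : Int}
    (hs : PySem.Raise.InRange m s) :
    ∀ y, ReachC adj m s y → PySem.Raise.InRange m y := by
  intro y h
  induction h with
  | refl => exact hs
  | tail _ h2 _ => exact h2.2

-- a closed marked set containing s's slot contains the slot of everything reachable
lemma reach_marked {adj : PySem.Dict Int (List Int)} {m : Nat} {s : Int} {U : List Int}
    {R : List Bool}
    (hvals : ∀ u v, NbrP adj u v → v ∈ U) (hsU : s ∈ U) (hsIn : PySem.Raise.InRange m s)
    (hs : MkS R (slotI m s))
    (hcl : ∀ u ∈ U, PySem.Raise.InRange m u → MkS R (slotI m u) →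
      ∀ v, NbrP adj u v → PySem.Raise.InRange m v → MkS R (slotI m v)) :
    ∀ y, ReachC adj m s y → MkS R (slotI m y) := by
  intro y h
  induction h with
  | refl => exact hs
  | tail h1 h2 ih =>
    exact hcl _ (reach_mem hvals hsU _ h1) (reach_inR hsIn _ h1) ih _ h2.1 h2.2

-- ----- the initial visited list -----

lemma mk_init_slot (m : Nat) (s : Int) (hm : 0 < m) (hs : PySem.Raise.InRange m s) :
    (PySem.List.pySetD (List.replicate m false) s true).length = m ∧
    (∀ j, MkS (PySem.List.pySetD (List.replicate m false) s true) j ↔ j = slotI m s) ∧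
    (PySem.List.pySetD (List.replicate m false) s true).count false + 1 = m := by
  have hlen : (List.replicate m false : List Bool).length = m := by simp
  have hs' : PySem.Raise.InRange (List.replicate m false : List Bool).length s := by
    rwa [hlen]
  rw [pySetD_wrap true hs', hlen]
  have hsl : slotI m s < m := slotI_lt hm s
  refine ⟨by simp, ?_, ?_⟩
  · intro j
    constructor
    · intro hj
      rcases getD_set_rev hj with hold | hidx
      · exfalso
        have hjl : j < m := by simpa using getD_true_lt hold
        rw [List.getD_eq_getElem?_getD, List.getElem?_eq_getElem (by simpa using hjl)] at hold
        simp at hold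
      · exact hidx
    · rintro rfl
      exact getD_set_self (by simpa using hsl)
  · have := count_false_set (V := List.replicate m false) (i := slotI m s)
      (by simpa using hsl)
      (by simp [List.getD_eq_getElem?_getD, hsl])
    simp at this ⊢
    omega

-- ----- A's inner loop -----

lemma bfsInner_spec (m : Nat) (U : List Int)
    (hinj : ∀ x ∈ U, ∀ y ∈ U, PySem.Raise.InRange m x → PySem.Raise.InRange m y →
      slotI m x = slotI m y → x = y)
    (l : List Int) (hlU : ∀ x ∈ l, x ∈ U) :
    ∀ (V : List Bool) (q : List Int), V.length = m →
    ((l.foldl bfsStep (V, q)).1.length = m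
    ∧ (∀ j, MkS V j → MkS (l.foldl bfsStep (V, q)).1 j)
    ∧ (∀ j, MkS (l.foldl bfsStep (V, q)).1 j → MkS V j ∨
        ∃ x ∈ l, PySem.Raise.InRange m x ∧ slotI m x = j)
    ∧ (∀ x ∈ l, PySem.Raise.InRange m x → MkS (l.foldl bfsStep (V, q)).1 (slotI m x))
    ∧ (∀ y ∈ q, y ∈ (l.foldl bfsStep (V, q)).2)
    ∧ (∀ y ∈ (l.foldl bfsStep (V, q)).2, y ∈ q ∨ (y ∈ l ∧ PySem.Raise.InRange m y))
    ∧ (∀ y ∈ U, PySem.Raise.InRange m y → MkS (l.foldl bfsStep (V, q)).1 (slotI m y) →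
        ¬ MkS V (slotI m y) → y ∈ (l.foldl bfsStep (V, q)).2)
    ∧ (l.foldl bfsStep (V, q)).2.length + (l.foldl bfsStep (V, q)).1.count false
        ≤ q.length + V.count false) := by
  induction l with
  | nil =>
    intro V q hV
    exact ⟨hV, fun j h => h, fun j h => Or.inl h, by simp, fun y h => h,
      fun y h => Or.inl h, fun y _ _ h hn => absurd h hn, le_refl _⟩
  | cons x xs ih =>
    intro V q hV
    have hxU : x ∈ U := hlU x List.mem_cons_self
    have hlU' : ∀ z ∈ xs, z ∈ U := fun z hz => hlU z (List.mem_cons_of_mem _ hz)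
    simp only [List.foldl_cons]
    by_cases ht : PySem.List.pyGet? V x = some false
    · -- x in range and unmarked: mark it and append it to the queue
      obtain ⟨hxin, hxf⟩ := pyGet?_some_inv ht
      rw [hV] at hxin
      have hxin' : PySem.Raise.InRange V.length x := by rwa [hV]
      have hsl : slotI m x < m := slotI_lt (by rcases hxin with ⟨h1, h2⟩; omega) x
      have hstep : bfsStep (V, q) x = (V.set (slotI m x) true, q ++ [x]) := by
        simp only [bfsStep, if_pos ht, pySetD_wrap true hxin', hV]
      rw [hstep]
      have hV' : (V.set (slotI m x) true).length = m := by simpa using hV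
      obtain ⟨c1, c2, c3, c4, c5, c6, c7, c8⟩ := ih hlU' (V.set (slotI m x) true) (q ++ [x]) hV'
      have hxf' : V.getD (slotI m x) false = false := by rwa [hV] at hxf
      have hlt : slotI m x < V.length := by omega
      have hmk' : MkS (V.set (slotI m x) true) (slotI m x) := getD_set_self hlt
      have hcf : (V.set (slotI m x) true).count false + 1 = V.count false :=
        count_false_set hlt hxf'
      refine ⟨c1, fun j hj => c2 j (getD_set_mono hj), ?_, ?_, ?_, ?_, ?_, ?_⟩
      · intro j hj
        rcases c3 j hj with h | h
        · rcases getD_set_rev h with h' | h'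
          · exact Or.inl h'
          · exact Or.inr ⟨x, List.mem_cons_self, hxin, h'.symm⟩
        · obtain ⟨z, hz, hzin, hzs⟩ := h
          exact Or.inr ⟨z, List.mem_cons_of_mem _ hz, hzin, hzs⟩
      · intro z hz hzin
        rcases List.mem_cons.1 hz with rfl | hz'
        · exact c2 _ hmk'
        · exact c4 z hz' hzin
      · intro y hy
        exact c5 y (List.mem_append_left _ hy)
      · intro y hy
        rcases c6 y hy with h | h
        · rcases List.mem_append.1 h with h' | h'
          · exact Or.inl h'
          · simp at h'; subst h'; exact Or.inr ⟨List.mem_cons_self, hxin⟩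
        · exact Or.inr ⟨List.mem_cons_of_mem _ h.1, h.2⟩
      · intro y hyU hyin hy hn
        by_cases hv' : MkS (V.set (slotI m x) true) (slotI m y)
        · rcases getD_set_rev hv' with h | h
          · exact absurd h hn
          · have hyx : y = x := hinj y hyU x hxU hyin hxin h
            exact hyx ▸ c5 x (List.mem_append_right _ (List.mem_singleton_self x))
        · exact c7 y hyU hyin hy hv'
      · have hql : (q ++ [x]).length = q.length + 1 := by simp
        omega
    · -- x out of range, or already marked: state unchanged
      have hstep : bfsStep (V, q) x = (V, q) := by simp [bfsStep, ht]
      rw [hstep]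
      obtain ⟨c1, c2, c3, c4, c5, c6, c7, c8⟩ := ih hlU' V q hV
      refine ⟨c1, c2, ?_, ?_, c5, ?_, c7, c8⟩
      · intro j hj
        rcases c3 j hj with h | h
        · exact Or.inl h
        · obtain ⟨z, hz, hzin, hzs⟩ := h
          exact Or.inr ⟨z, List.mem_cons_of_mem _ hz, hzin, hzs⟩
      · intro z hz hzin
        rcases List.mem_cons.1 hz with rfl | hz'
        · -- in range but test failed, so z is already marked
          have hzin' : PySem.Raise.InRange V.length z := by rwa [hV]
          have := pyGet?_wrap hzin'
          rw [hV] at this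
          cases hb : V.getD (slotI m z) false
          · exact absurd (by rw [this, hb]) ht
          · exact c2 _ hb
        · exact c4 z hz' hzin
      · intro y hy
        rcases c6 y hy with h | h
        · exact Or.inl h
        · exact Or.inr ⟨List.mem_cons_of_mem _ h.1, h.2⟩

-- ----- A's outer loop -----

lemma bfsLoop_spec (adj : PySem.Dict Int (List Int)) (s : Int) (m : Nat) (U : List Int)
    (hinj : ∀ x ∈ U, ∀ y ∈ U, PySem.Raise.InRange m x → PySem.Raise.InRange m y →
      slotI m x = slotI m y → x = y)
    (hvals : ∀ u v, NbrP adj u v → v ∈ U)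
    (hsU : s ∈ U) (hsIn : PySem.Raise.InRange m s) :
    ∀ (fuel : Nat) (V : List Bool) (q : List Int), V.length = m →
    (∀ y ∈ q, y ∈ U ∧ PySem.Raise.InRange m y ∧ MkS V (slotI m y)) →
    SoundV adj m s V →
    (∀ u ∈ U, PySem.Raise.InRange m u → MkS V (slotI m u) → u ∈ q ∨
      ∀ v, NbrP adj u v → PySem.Raise.InRange m v → MkS V (slotI m v)) →
    q.length + V.count false ≤ fuel →
    ((bfsLoop adj fuel V q).length = m
    ∧ (∀ j, MkS V j → MkS (bfsLoop adj fuel V q) j)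
    ∧ SoundV adj m s (bfsLoop adj fuel V q)
    ∧ (∀ u ∈ U, PySem.Raise.InRange m u → MkS (bfsLoop adj fuel V q) (slotI m u) →
        ∀ v, NbrP adj u v → PySem.Raise.InRange m v →
          MkS (bfsLoop adj fuel V q) (slotI m v))) := by
  intro fuel
  induction fuel with
  | zero =>
    intro V q hV hq hsound hproc hfuel
    have hq0 : q = [] := List.eq_nil_of_length_eq_zero (by omega)
    subst hq0
    simp only [bfsLoop]
    refine ⟨hV, fun j h => h, hsound, ?_⟩
    intro u huU huin hu v hnbr hvin
    rcases hproc u huU huin hu with h | h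
    · simp at h
    · exact h v hnbr hvin
  | succ fuel ih =>
    intro V q hV hq hsound hproc hfuel
    cases q with
    | nil =>
      simp only [bfsLoop]
      refine ⟨hV, fun j h => h, hsound, ?_⟩
      intro u huU huin hu v hnbr hvin
      rcases hproc u huU huin hu with h | h
      · simp at h
      · exact h v hnbr hvin
    | cons source rest =>
      obtain ⟨hsrcU, hsrcin, hsrcmk⟩ := hq source List.mem_cons_self
      have hRsrc : ReachC adj m s source := by
        obtain ⟨y, hyR, hys⟩ := hsound _ hsrcmk
        have hyU : y ∈ U := reach_mem hvals hsU y hyR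
        have hyin : PySem.Raise.InRange m y := reach_inR hsIn y hyR
        exact (hinj y hyU source hsrcU hyin hsrcin hys) ▸ hyR
      by_cases hc : adj.contains source = true
      · have hred : bfsLoop adj (fuel+1) V (source :: rest) =
            bfsLoop adj fuel ((adj.getD source []).foldl bfsStep (V, rest)).1
              ((adj.getD source []).foldl bfsStep (V, rest)).2 := by
          simp [bfsLoop, hc]
        rw [hred]
        have hlU : ∀ x ∈ adj.getD source [], x ∈ U := fun x hx => hvals source x hx
        obtain ⟨c1, c2, c3, c4, c5, c6, c7, c8⟩ :=
          bfsInner_spec m U hinj (adj.getD source []) hlU V rest hV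
        have hq' : ∀ y ∈ ((adj.getD source []).foldl bfsStep (V, rest)).2,
            y ∈ U ∧ PySem.Raise.InRange m y ∧
            MkS ((adj.getD source []).foldl bfsStep (V, rest)).1 (slotI m y) := by
          intro y hy
          rcases c6 y hy with h | h
          · obtain ⟨hU, hin, hmk⟩ := hq y (List.mem_cons_of_mem _ h)
            exact ⟨hU, hin, c2 _ hmk⟩
          · exact ⟨hlU y h.1, h.2, c4 y h.1 h.2⟩
        have hsound' : SoundV adj m s ((adj.getD source []).foldl bfsStep (V, rest)).1 := by
          intro j hj
          rcases c3 j hj with h | h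
          · exact hsound j h
          · obtain ⟨x, hx, hxin, hxs⟩ := h
            exact ⟨x, Relation.ReflTransGen.tail hRsrc ⟨hx, hxin⟩, hxs⟩
        have hproc' : ∀ u ∈ U, PySem.Raise.InRange m u →
            MkS ((adj.getD source []).foldl bfsStep (V, rest)).1 (slotI m u) →
            u ∈ ((adj.getD source []).foldl bfsStep (V, rest)).2 ∨
            ∀ v, NbrP adj u v → PySem.Raise.InRange m v →
              MkS ((adj.getD source []).foldl bfsStep (V, rest)).1 (slotI m v) := by
          intro u huU huin hu
          by_cases hMk : MkS V (slotI m u)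
          · rcases hproc u huU huin hMk with hin | hcl
            · rcases List.mem_cons.1 hin with rfl | hr
              · exact Or.inr (fun v hnbr hvin => c4 v hnbr hvin)
              · exact Or.inl (c5 u hr)
            · exact Or.inr (fun v hnbr hvin => c2 _ (hcl v hnbr hvin))
          · exact Or.inl (c7 u huU huin hu hMk)
        have hfuel' : ((adj.getD source []).foldl bfsStep (V, rest)).2.length +
            ((adj.getD source []).foldl bfsStep (V, rest)).1.count false ≤ fuel := by
          simp only [List.length_cons] at hfuel
          omega
        obtain ⟨d1, d2, d3, d4⟩ := ih _ _ c1 hq' hsound' hproc' hfuel'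
        exact ⟨d1, fun j hj => d2 j (c2 j hj), d3, d4⟩
      · have hc' : adj.contains source = false := by
          cases h : adj.contains source
          · rfl
          · exact absurd h hc
        have hred : bfsLoop adj (fuel+1) V (source :: rest) = bfsLoop adj fuel V rest := by
          simp [bfsLoop, hc]
        rw [hred]
        have hnil : adj.getD source [] = [] := getD_eq_nil_of_not_contains hc'
        apply ih V rest hV (fun y hy => hq y (List.mem_cons_of_mem _ hy)) hsound
        · intro u huU huin hu
          rcases hproc u huU huin hu with hin | hcl
          · rcases List.mem_cons.1 hin with rfl | hr
            · right
              intro v hnbr hvin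
              rw [NbrP, hnil] at hnbr
              simp at hnbr
            · exact Or.inl hr
          · exact Or.inr hcl
        · simp only [List.length_cons] at hfuel
          omega

-- ----- B's recursive DFS -----

lemma dfsGo_spec (adj : PySem.Dict Int (List Int)) (s : Int) (m : Nat) (U : List Int)
    (hinj : ∀ x ∈ U, ∀ y ∈ U, PySem.Raise.InRange m x → PySem.Raise.InRange m y →
      slotI m x = slotI m y → x = y)
    (hvals : ∀ u v, NbrP adj u v → v ∈ U) :
    ∀ (fuel : Nat) (u : Int) (V : List Bool), V.length = m → u ∈ U →
    ReachC adj m s u → SoundV adj m s V → V.count false + 1 ≤ fuel →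
    ((dfsGo adj fuel u V).length = m
    ∧ (∀ j, MkS V j → MkS (dfsGo adj fuel u V) j)
    ∧ SoundV adj m s (dfsGo adj fuel u V)
    ∧ (∀ x, NbrP adj u x → PySem.Raise.InRange m x → MkS (dfsGo adj fuel u V) (slotI m x))
    ∧ (∀ y ∈ U, PySem.Raise.InRange m y → MkS (dfsGo adj fuel u V) (slotI m y) →
        ¬ MkS V (slotI m y) →
        ∀ v, NbrP adj y v → PySem.Raise.InRange m v → MkS (dfsGo adj fuel u V) (slotI m v))
    ∧ (dfsGo adj fuel u V).count false ≤ V.count false) := by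
  intro fuel
  induction fuel with
  | zero =>
    intro u V hV huU huR hsound hfuel
    exact absurd hfuel (by omega)
  | succ fuel ih =>
    intro u V hV huU huR hsound hfuel
    simp only [dfsGo]
    -- the fold over the neighbour list, generalized over its start state W
    have aux : ∀ l : List Int, (∀ x ∈ l, NbrP adj u x) → ∀ W : List Bool,
        W.length = m → SoundV adj m s W → W.count false ≤ V.count false →
        (∀ y ∈ U, PySem.Raise.InRange m y → MkS W (slotI m y) → ¬ MkS V (slotI m y) →
          ∀ v, NbrP adj y v → PySem.Raise.InRange m v → MkS W (slotI m v)) →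
        ((l.foldl (fun vis x =>
            if PySem.List.pyGet? vis x = some false then
              dfsGo adj fuel x (PySem.List.pySetD vis x true)
            else vis) W).length = m
        ∧ (∀ j, MkS W j → MkS (l.foldl (fun vis x =>
            if PySem.List.pyGet? vis x = some false then
              dfsGo adj fuel x (PySem.List.pySetD vis x true)
            else vis) W) j)
        ∧ SoundV adj m s (l.foldl (fun vis x =>
            if PySem.List.pyGet? vis x = some false then
              dfsGo adj fuel x (PySem.List.pySetD vis x true)
            else vis) W)
        ∧ (∀ x ∈ l, PySem.Raise.InRange m x → MkS (l.foldl (fun vis x =>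
            if PySem.List.pyGet? vis x = some false then
              dfsGo adj fuel x (PySem.List.pySetD vis x true)
            else vis) W) (slotI m x))
        ∧ (∀ y ∈ U, PySem.Raise.InRange m y → MkS (l.foldl (fun vis x =>
            if PySem.List.pyGet? vis x = some false then
              dfsGo adj fuel x (PySem.List.pySetD vis x true)
            else vis) W) (slotI m y) → ¬ MkS V (slotI m y) →
            ∀ v, NbrP adj y v → PySem.Raise.InRange m v → MkS (l.foldl (fun vis x =>
              if PySem.List.pyGet? vis x = some false then
                dfsGo adj fuel x (PySem.List.pySetD vis x true)
              else vis) W) (slotI m v))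
        ∧ (l.foldl (fun vis x =>
            if PySem.List.pyGet? vis x = some false then
              dfsGo adj fuel x (PySem.List.pySetD vis x true)
            else vis) W).count false ≤ W.count false) := by
      intro l hlN
      induction l with
      | nil =>
        intro W hWlen hWsound hWcf hacc
        exact ⟨hWlen, fun j h => h, hWsound, by simp, hacc, le_refl _⟩
      | cons x xs ihl =>
        intro W hWlen hWsound hWcf hacc
        have hxN : NbrP adj u x := hlN x List.mem_cons_self
        have hlN' : ∀ z ∈ xs, NbrP adj u z := fun z hz => hlN z (List.mem_cons_of_mem _ hz)
        have hxU : x ∈ U := hvals u x hxN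
        simp only [List.foldl_cons]
        by_cases ht : PySem.List.pyGet? W x = some false
        · -- x in range and unmarked: mark it and recurse into it
          obtain ⟨hxin', hxf⟩ := pyGet?_some_inv ht
          have hxin : PySem.Raise.InRange m x := by rwa [hWlen] at hxin'
          have hstep : (if PySem.List.pyGet? W x = some false then
              dfsGo adj fuel x (PySem.List.pySetD W x true) else W) =
              dfsGo adj fuel x (W.set (slotI m x) true) := by
            rw [if_pos ht, pySetD_wrap true hxin', hWlen]
          rw [hstep]
          have hxf' : W.getD (slotI m x) false = false := by rwa [hWlen] at hxf
          have hslt : slotI m x < W.length := by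
            rw [hWlen]; exact slotI_lt (by rcases hxin with ⟨h1, h2⟩; omega) x
          have hcf1 : (W.set (slotI m x) true).count false + 1 = W.count false :=
            count_false_set hslt hxf'
          have hxR : ReachC adj m s x := Relation.ReflTransGen.tail huR ⟨hxN, hxin⟩
          obtain ⟨e1, e2, e3, e4, e5, e6⟩ := ih x (W.set (slotI m x) true)
            (by simpa using hWlen) hxU hxR
            (by
              intro j hj
              rcases getD_set_rev hj with h | h
              · exact hWsound j h
              · exact ⟨x, hxR, h.symm⟩)
            (by omega)
          have hmono1 : ∀ j, MkS W j → MkS (dfsGo adj fuel x (W.set (slotI m x) true)) j :=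
            fun j hj => e2 j (getD_set_mono hj)
          have hacc1 : ∀ y ∈ U, PySem.Raise.InRange m y →
              MkS (dfsGo adj fuel x (W.set (slotI m x) true)) (slotI m y) →
              ¬ MkS V (slotI m y) →
              ∀ v, NbrP adj y v → PySem.Raise.InRange m v →
                MkS (dfsGo adj fuel x (W.set (slotI m x) true)) (slotI m v) := by
            intro y hyU hyin hy hnv v hnbr hvin
            by_cases hy1 : MkS (W.set (slotI m x) true) (slotI m y)
            · rcases getD_set_rev hy1 with h | h
              · exact hmono1 _ (hacc y hyU hyin h hnv v hnbr hvin)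
              · have hyx : y = x := hinj y hyU x hxU hyin hxin h
                subst hyx
                exact e4 v hnbr hvin
            · exact e5 y hyU hyin hy hy1 v hnbr hvin
          obtain ⟨f1, f2, f3, f4, f5, f6⟩ := ihl hlN'
            (dfsGo adj fuel x (W.set (slotI m x) true)) e1 e3 (by omega) hacc1
          refine ⟨f1, fun j hj => f2 j (hmono1 j hj), f3, ?_, f5, by omega⟩
          intro z hz hzin
          rcases List.mem_cons.1 hz with rfl | hz'
          · exact f2 _ (e2 _ (getD_set_self hslt))
          · exact f4 z hz' hzin
        · -- x out of range, or already marked: state unchanged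
          have hstep : (if PySem.List.pyGet? W x = some false then
              dfsGo adj fuel x (PySem.List.pySetD W x true) else W) = W := by
            rw [if_neg ht]
          rw [hstep]
          obtain ⟨f1, f2, f3, f4, f5, f6⟩ := ihl hlN' W hWlen hWsound hWcf hacc
          refine ⟨f1, f2, f3, ?_, f5, f6⟩
          intro z hz hzin
          rcases List.mem_cons.1 hz with rfl | hz'
          · have hzin' : PySem.Raise.InRange W.length z := by rwa [hWlen]
            have hw := pyGet?_wrap hzin'
            rw [hWlen] at hw
            cases hb : W.getD (slotI m z) false
            · exact absurd (by rw [hw, hb]) ht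
            · exact f2 _ hb
          · exact f4 z hz' hzin
    have hacc0 : ∀ y ∈ U, PySem.Raise.InRange m y → MkS V (slotI m y) →
        ¬ MkS V (slotI m y) → ∀ v, NbrP adj y v → PySem.Raise.InRange m v →
        MkS V (slotI m v) := fun y _ _ h hn => absurd h hn
    obtain ⟨f1, f2, f3, f4, f5, f6⟩ := aux (adj.getD u []) (fun x hx => hx) V hV hsound
      (le_refl _) hacc0
    exact ⟨f1, f2, f3, fun x hx hxin => f4 x hx hxin, f5, f6⟩

-- ===== VERDICT (by name: the statement is the Claim_ definition above) =====
theorem bfs_spec : Claim_equal_bfs := by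
  intro N M s d _hdom hpre
  obtain ⟨hlen, hs1, hs2, hinjP⟩ := hpre
  unfold Spec_bfs bfs bfs_alt
  show PySem.List.pyGetD (bfsLoop (generateAdjMatrix N M true) (N.length + 2)
      (PySem.List.pySetD (List.replicate (N.length + 1) false) s true) [s]) (N.length : Int) false
    = PySem.List.pyGetD (dfsGo (generateAdjMatrix N M true) (N.length + 2) s
      (PySem.List.pySetD (List.replicate (N.length + 1) false) s true)) (N.length : Int) false
  set adj := generateAdjMatrix N M true with hadj
  set U : List Int := s :: (N ++ M.take N.length) with hU
  have hm : 0 < N.length + 1 := by omega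
  have hcast : ((N.length + 1 : Nat) : Int) = (N.length : Int) + 1 := by push_cast; ring
  have hInR : ∀ x : Int, PySem.Raise.InRange (N.length + 1) x ↔
      -((N.length : Int)+1) ≤ x ∧ x ≤ (N.length : Int) := by
    intro x
    unfold PySem.Raise.InRange
    rw [hcast]
    omega
  have hsIn : PySem.Raise.InRange (N.length + 1) s := (hInR s).2 ⟨hs1, hs2⟩
  have hinj : ∀ x ∈ U, ∀ y ∈ U, PySem.Raise.InRange (N.length + 1) x →
      PySem.Raise.InRange (N.length + 1) y →
      slotI (N.length + 1) x = slotI (N.length + 1) y → x = y := by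
    intro x hx y hy hxin hyin hsl
    rw [hInR] at hxin hyin
    refine hinjP x hx y hy hxin.1 hxin.2 hyin.1 hyin.2 ?_
    unfold slotI at hsl
    rw [hcast] at hsl
    have h1 : 0 ≤ x % ((N.length : Int) + 1) := Int.emod_nonneg x (by positivity)
    have h2 : 0 ≤ y % ((N.length : Int) + 1) := Int.emod_nonneg y (by positivity)
    omega
  have hvals : ∀ u v, NbrP adj u v → v ∈ U := by
    intro u v hnbr
    exact List.mem_cons_of_mem _ (getD_sub (adj_labels N M hlen) u v hnbr)
  have hsU : s ∈ U := List.mem_cons_self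
  obtain ⟨hV1len, hV1iff, hV1cf⟩ := mk_init_slot (N.length + 1) s hm hsIn
  set V1 := PySem.List.pySetD (List.replicate (N.length + 1) false) s true with hV1
  have hV1s : MkS V1 (slotI (N.length + 1) s) := (hV1iff _).2 rfl
  have hV1sound : SoundV adj (N.length + 1) s V1 := by
    intro j hj
    exact ⟨s, Relation.ReflTransGen.refl, ((hV1iff j).1 hj).symm⟩
  -- run A's loop
  obtain ⟨a1, a2, a3, a4⟩ := bfsLoop_spec adj s (N.length + 1) U hinj hvals hsU hsIn
    (N.length + 2) V1 [s] hV1len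
    (by
      intro y hy
      simp only [List.mem_singleton] at hy
      subst hy
      exact ⟨hsU, hsIn, hV1s⟩)
    hV1sound
    (by
      intro u huU huin hu
      have := hinj u huU s hsU huin hsIn ((hV1iff _).1 hu)
      subst this
      exact Or.inl (List.mem_singleton_self u))
    (by simp only [List.length_singleton]; omega)
  -- run B's recursion
  obtain ⟨b1, b2, b3, b4, b5, b6⟩ := dfsGo_spec adj s (N.length + 1) U hinj hvals
    (N.length + 2) s V1 hV1len hsU Relation.ReflTransGen.refl hV1sound (by omega)
  -- B's result is closed under in-range edges
  have hBclosed : ∀ u ∈ U, PySem.Raise.InRange (N.length + 1) u →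
      MkS (dfsGo adj (N.length + 2) s V1) (slotI (N.length + 1) u) →
      ∀ v, NbrP adj u v → PySem.Raise.InRange (N.length + 1) v →
        MkS (dfsGo adj (N.length + 2) s V1) (slotI (N.length + 1) v) := by
    intro u huU huin hu v hnbr hvin
    by_cases hMk : MkS V1 (slotI (N.length + 1) u)
    · have := hinj u huU s hsU huin hsIn ((hV1iff _).1 hMk)
      subst this
      exact b4 v hnbr hvin
    · exact b5 u huU huin hu hMk v hnbr hvin
  -- both results mark exactly the slots of reachable labels
  have hAiff : ∀ j, MkS (bfsLoop adj (N.length + 2) V1 [s]) j ↔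
      ∃ y, ReachC adj (N.length + 1) s y ∧ slotI (N.length + 1) y = j := by
    intro j
    refine ⟨a3 j, ?_⟩
    rintro ⟨y, hyR, rfl⟩
    exact reach_marked hvals hsU hsIn (a2 _ hV1s) a4 y hyR
  have hBiff : ∀ j, MkS (dfsGo adj (N.length + 2) s V1) j ↔
      ∃ y, ReachC adj (N.length + 1) s y ∧ slotI (N.length + 1) y = j := by
    intro j
    refine ⟨b3 j, ?_⟩
    rintro ⟨y, hyR, rfl⟩
    exact reach_marked hvals hsU hsIn (b2 _ hV1s) hBclosed y hyR
  -- compare the two outputs at index n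
  have hn0 : (0 : Int) ≤ (N.length : Int) := by positivity
  rw [PySem.List.pyGetD_of_nonneg _ _ hn0, PySem.List.pyGetD_of_nonneg _ _ hn0]
  rw [Bool.eq_iff_iff]
  simp only [Int.toNat_natCast]
  exact (hAiff N.length).trans (hBiff N.length).symm
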